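-- pv_equiv track=rewrite | github.com/RTXteam/RTX | code/ARAX/ARAXQuery/Expand/smartapi.py | _filter_kps_by_maturity
-- ===== SOURCE A (Python) =====
-- def _filter_kps_by_maturity(KPs, req_maturity, flexible, hierarchy):
--     """Return a list of KPs which have been filtered based on the maturity attribute of their servers. If flexible is false, it will remove servers from each KP whose maturity does not match req_maturity. If flexible is true, it will use the specified 'hierarchy' to look use the next best maturity level for each server until at least one server has been found. It returns only the KPs with servers remaining after they have been filtered in this way."""
--     if not flexible:
--         for kp in KPs:
--             kp["servers"] = [server for server in kp["servers"] if server["maturity"] == req_maturity]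
--         KPs = [kp for kp in KPs if len(kp["servers"]) != 0]
--         return KPs
--
--     # if reqMaturity is 'testing' and the default hierarchy is used
--     # it should look something like this, where | is the maturity_thresh:
--     # ['development', 'staging', | 'testing', 'production']
--     # and it will consider both 'testing' and 'production' maturities valid
--     maturity_thresh = hierarchy.index(req_maturity)
--     acceptable_maturities = hierarchy[maturity_thresh:]
--     for kp in KPs:
--         for maturity in acceptable_maturities:
--             servers = [server for server in kp["servers"] if server["maturity"] == maturity]
--             if len(servers) != 0:
--                 kp["servers"] = servers
--                 break
--         else:
--             kp["servers"] = []
--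
--     KPs = [kp for kp in KPs if len(kp["servers"]) != 0]
--     return KPs
-- ===== SOURCE B (Python) =====
-- def _filter_kps_by_maturity(KPs, req_maturity, flexible, hierarchy):
--     if flexible:
--         acceptable = hierarchy[hierarchy.index(req_maturity):]
--     else:
--         acceptable = [req_maturity]
--     for kp in KPs:
--         by_maturity = {}
--         for server in kp["servers"]:
--             by_maturity.setdefault(server["maturity"], []).append(server)
--         kp["servers"] = next((by_maturity[m] for m in acceptable if m in by_maturity and by_maturity[m]), [])
--     return [kp for kp in KPs if kp["servers"]]
-- ===== Notes on version B (the rewrite author's own statement) =====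
-- stated objective: simpler
-- what changed: Both branches are unified (non-flexible becomes acceptable=[req_maturity]) and the per-KP nested rescan of servers for each acceptable maturity is replaced by one grouping pass building a maturity->servers dict followed by a single scan of the acceptable maturities.
import Mathlib
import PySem

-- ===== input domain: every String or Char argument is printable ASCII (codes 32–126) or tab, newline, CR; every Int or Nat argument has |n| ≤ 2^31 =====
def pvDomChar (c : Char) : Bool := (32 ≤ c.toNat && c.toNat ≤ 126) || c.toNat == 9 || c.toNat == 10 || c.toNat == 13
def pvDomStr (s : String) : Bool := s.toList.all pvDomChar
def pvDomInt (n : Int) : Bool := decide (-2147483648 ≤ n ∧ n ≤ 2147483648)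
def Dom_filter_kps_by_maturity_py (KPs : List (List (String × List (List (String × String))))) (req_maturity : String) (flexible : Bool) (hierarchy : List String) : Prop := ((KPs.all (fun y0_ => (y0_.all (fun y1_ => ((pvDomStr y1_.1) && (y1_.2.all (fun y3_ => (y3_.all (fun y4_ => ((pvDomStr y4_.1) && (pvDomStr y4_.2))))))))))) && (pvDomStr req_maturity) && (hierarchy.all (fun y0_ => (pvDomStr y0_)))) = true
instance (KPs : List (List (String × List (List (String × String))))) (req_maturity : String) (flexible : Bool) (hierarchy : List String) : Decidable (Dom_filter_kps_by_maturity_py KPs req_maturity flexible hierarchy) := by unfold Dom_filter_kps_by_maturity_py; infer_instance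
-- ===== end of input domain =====

-- B unifies the two branches (non-flexible = acceptable list [req_maturity]) and replaces the
-- per-KP rescan of the servers for each acceptable maturity by one grouping pass + one scan of
-- the acceptable maturities. Both Pythons mutate the KP dicts in place identically; the theorems
-- below are about the return value.

-- dict subscript read d[k] (first match; default only reached outside Pre_) — shared primitive
def pvDictGetD {α : Type} (d : List (String × α)) (k : String) (dflt : α) : α :=
  ((d.find? (fun p => p.1 == k)).map (·.2)).getD dflt

-- dict subscript assignment d[k] = v (overwrite keeps position; new key appends) — shared primitive
def pvDictSet {α : Type} : List (String × α) → String → α → List (String × α)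
  | [], k, v => [(k, v)]
  | (k', v') :: rest, k, v => if k' == k then (k, v) :: rest else (k', v') :: pvDictSet rest k v

-- ===== PORT A =====
-- the inner 'for maturity in acceptable_maturities: … break / else: …' loop of A
def pvA_pick (servers : List (List (String × String))) : List String → List (List (String × String))
  | [] => []
  | m :: rest =>
    let s := servers.filter (fun sv => pvDictGetD sv "maturity" "" == m)
    if s.length != 0 then s else pvA_pick servers rest

def filter_kps_by_maturity_py (KPs : List (List (String × List (List (String × String))))) (req_maturity : String) (flexible : Bool) (hierarchy : List String) : List (List (String × List (List (String × String)))) :=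
  if flexible = false then
    let KPs' := KPs.map (fun kp =>
      pvDictSet kp "servers"
        ((pvDictGetD kp "servers" []).filter (fun sv => pvDictGetD sv "maturity" "" == req_maturity)))
    KPs'.filter (fun kp => (pvDictGetD kp "servers" []).length != 0)
  else
    let maturity_thresh := (PySem.List.index? hierarchy req_maturity).getD 0
    let acceptable_maturities := hierarchy.drop maturity_thresh
    let KPs' := KPs.map (fun kp =>
      pvDictSet kp "servers" (pvA_pick (pvDictGetD kp "servers" []) acceptable_maturities))
    KPs'.filter (fun kp => (pvDictGetD kp "servers" []).length != 0)

-- ===== PORT B =====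
-- by_maturity.setdefault(k, []).append(v)
def pvGroupAdd {α : Type} : List (String × List α) → String → α → List (String × List α)
  | [], k, v => [(k, [v])]
  | (k', vs) :: rest, k, v =>
    if k' == k then (k', vs ++ [v]) :: rest else (k', vs) :: pvGroupAdd rest k v

-- the grouping pass over the servers
def pvB_group (servers : List (List (String × String))) : List (String × List (List (String × String))) :=
  servers.foldl (fun g sv => pvGroupAdd g (pvDictGetD sv "maturity" "") sv) []

-- next((by_maturity[m] for m in acceptable if m in by_maturity and by_maturity[m]), [])
def pvB_pick (g : List (String × List (List (String × String)))) : List String → List (List (String × String))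
  | [] => []
  | m :: rest =>
    match g.find? (fun p => p.1 == m) with
    | some p => if p.2.length != 0 then p.2 else pvB_pick g rest
    | none => pvB_pick g rest

def filter_kps_by_maturity_py_alt (KPs : List (List (String × List (List (String × String))))) (req_maturity : String) (flexible : Bool) (hierarchy : List String) : List (List (String × List (List (String × String)))) :=
  let acceptable :=
    if flexible then hierarchy.drop ((PySem.List.index? hierarchy req_maturity).getD 0)
    else [req_maturity]
  (KPs.map (fun kp =>
      pvDictSet kp "servers" (pvB_pick (pvB_group (pvDictGetD kp "servers" [])) acceptable))).filter
    (fun kp => (pvDictGetD kp "servers" []).length != 0)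

-- ===== PRECONDITION & SPEC =====
-- Pre_ excludes exactly the inputs on which the Python raises: ValueError when flexible and
-- req_maturity is not in hierarchy, KeyError when a KP lacks "servers" or a server under the
-- "servers" key lacks "maturity".
def Pre_filter_kps_by_maturity_py (KPs : List (List (String × List (List (String × String))))) (req_maturity : String) (flexible : Bool) (hierarchy : List String) : Prop :=
  (flexible = true → req_maturity ∈ hierarchy) ∧
  ∀ kp ∈ KPs, "servers" ∈ kp.map Prod.fst ∧
    ∀ p ∈ kp, p.1 = "servers" → ∀ sv ∈ p.2, "maturity" ∈ sv.map Prod.fst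
instance (KPs : List (List (String × List (List (String × String))))) (req_maturity : String) (flexible : Bool) (hierarchy : List String) : Decidable (Pre_filter_kps_by_maturity_py KPs req_maturity flexible hierarchy) := by unfold Pre_filter_kps_by_maturity_py; infer_instance

def pvWitness_filter_kps_by_maturity_py : (List (List (String × List (List (String × String))))) × String × Bool × List String :=
  ([[("servers", [[("maturity", "production")], [("maturity", "testing")]])]],
   "testing", true, ["development", "staging", "testing", "production"])

def Spec_filter_kps_by_maturity_py (KPs : List (List (String × List (List (String × String))))) (req_maturity : String) (flexible : Bool) (hierarchy : List String) (out : List (List (String × List (List (String × String))))) : Prop := out = filter_kps_by_maturity_py_alt KPs req_maturity flexible hierarchy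
instance (KPs : List (List (String × List (List (String × String))))) (req_maturity : String) (flexible : Bool) (hierarchy : List String) (out : List (List (String × List (List (String × String))))) : Decidable (Spec_filter_kps_by_maturity_py KPs req_maturity flexible hierarchy out) := by unfold Spec_filter_kps_by_maturity_py; infer_instance

-- ===== CLAIM (what is proved, stated in full; the proofs are below) =====
def Claim_equal_filter_kps_by_maturity_py : Prop := ∀ (KPs : List (List (String × List (List (String × String))))) (req_maturity : String) (flexible : Bool) (hierarchy : List String), Dom_filter_kps_by_maturity_py KPs req_maturity flexible hierarchy → Pre_filter_kps_by_maturity_py KPs req_maturity flexible hierarchy → Spec_filter_kps_by_maturity_py KPs req_maturity flexible hierarchy (filter_kps_by_maturity_py KPs req_maturity flexible hierarchy)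

-- ===== LEMMAS AND PROOFS =====

-- abbreviation used only in the proofs
def pvFilt (servers : List (List (String × String))) (m : String) : List (List (String × String)) :=
  servers.filter (fun sv => pvDictGetD sv "maturity" "" == m)

theorem pvGroupAdd_find (g : List (String × List (List (String × String)))) (k m : String)
    (v : List (String × String)) :
    (pvGroupAdd g k v).find? (fun p => p.1 == m) =
      if k = m then
        match g.find? (fun p => p.1 == m) with
        | some p => some (p.1, p.2 ++ [v])
        | none => some (k, [v])
      else g.find? (fun p => p.1 == m) := by
  induction g with
  | nil =>
    by_cases h : k = m
    · subst h; simp [pvGroupAdd]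
    · simp [pvGroupAdd, h]
  | cons hd tl ih =>
    obtain ⟨k', vs⟩ := hd
    simp only [pvGroupAdd]
    by_cases hk : k' = k
    · subst hk
      by_cases hm : k' = m
      · subst hm; simp
      · simp [hm]
    · rw [if_neg (by simpa using hk), List.find?_cons]
      by_cases hm : k' = m
      · subst hm
        have hkm : ¬ k = k' := fun h => hk h.symm
        simp [hkm]
      · have hb : (k' == m) = false := by simp [hm]
        simp [hb, ih]

theorem pvB_group_invariant (servers : List (List (String × String)))
    (g : List (String × List (List (String × String)))) (m : String) :
    (servers.foldl (fun g sv => pvGroupAdd g (pvDictGetD sv "maturity" "") sv) g).find?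
        (fun p => p.1 == m) =
      match g.find? (fun p => p.1 == m) with
      | some p => some (p.1, p.2 ++ pvFilt servers m)
      | none => if pvFilt servers m = [] then none else some (m, pvFilt servers m) := by
  induction servers generalizing g with
  | nil =>
    simp only [List.foldl_nil, pvFilt, List.filter_nil]
    cases g.find? (fun p => p.1 == m) <;> simp
  | cons sv rest ih =>
    simp only [List.foldl_cons]
    rw [ih, pvGroupAdd_find]
    by_cases h : pvDictGetD sv "maturity" "" = m
    · simp only [h, reduceIte]
      have hf : pvFilt (sv :: rest) m = sv :: pvFilt rest m := by
        simp [pvFilt, h]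
      cases hg : g.find? (fun p => p.1 == m) with
      | some p => simp [hf, List.append_assoc]
      | none => simp [hf]
    · have hf : pvFilt (sv :: rest) m = pvFilt rest m := by
        simp [pvFilt, h]
      simp only [h, if_false, hf]

theorem pvB_group_find (servers : List (List (String × String))) (m : String) :
    (pvB_group servers).find? (fun p => p.1 == m) =
      if pvFilt servers m = [] then none else some (m, pvFilt servers m) := by
  have h := pvB_group_invariant servers [] m
  simpa [pvB_group, List.find?] using h

theorem pick_eq (acc : List String) (servers : List (List (String × String))) :
    pvB_pick (pvB_group servers) acc = pvA_pick servers acc := by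
  induction acc with
  | nil => rfl
  | cons m rest ih =>
    rw [pvB_pick, pvB_group_find, pvA_pick]
    by_cases h : pvFilt servers m = []
    · rw [if_pos h, ih]
      have : ((pvFilt servers m).length != 0) = false := by simp [h]
      unfold pvFilt at this
      simp only [this, Bool.false_eq_true, if_false]
    · rw [if_neg h]
      have : ((pvFilt servers m).length != 0) = true := by
        simpa [List.length_eq_zero_iff] using h
      unfold pvFilt at this
      simp only [pvFilt, this, if_true]

theorem pick_single (servers : List (List (String × String))) (m : String) :
    pvA_pick servers [m] = pvFilt servers m := by
  rw [pvA_pick]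
  by_cases h : pvFilt servers m = []
  · have : ((pvFilt servers m).length != 0) = false := by simp [h]
    unfold pvFilt at this h
    simp only [this, Bool.false_eq_true, if_false, pvA_pick, pvFilt]
    exact h.symm
  · have : ((pvFilt servers m).length != 0) = true := by
      simpa [List.length_eq_zero_iff] using h
    unfold pvFilt at this
    simp only [pvFilt, this, if_true]

-- ===== VERDICT (by name: the statement is the Claim_ definition above) =====
theorem filter_kps_by_maturity_py_spec : Claim_equal_filter_kps_by_maturity_py := by
  intro KPs req_maturity flexible hierarchy _ _
  unfold Spec_filter_kps_by_maturity_py filter_kps_by_maturity_py filter_kps_by_maturity_py_alt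
  cases flexible with
  | false =>
    simp only [Bool.false_eq_true, if_false, reduceIte]
    congr 1
    apply List.map_congr_left
    intro kp _
    rw [pick_eq, pick_single, pvFilt]
  | true =>
    simp only [Bool.true_eq_false, if_false, reduceIte]
    congr 1
    apply List.map_congr_left
    intro kp _
    rw [pick_eq]
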